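-- pv_equiv track=rewrite | github.com/ImAdityaGupta/early-work | pseudoprimes/main.py | convert_into_matrix
-- ===== SOURCE A (Python) =====
-- def convert_into_matrix(coefficients):
--     #tmat = [[0 for 0 in range(len(coefficients))] for x in range(len(coefficients))]
--     coefficients = coefficients[1:]
--     tmat = []
--     n = len(coefficients)
--     for i in range(n):
--         temp = []
--         for j in range(n):
--             if i == j+1:
--                 temp.append(1)
--             elif j == n-1:
--                 temp.append(-coefficients[-i-1])
--             else:
--                 temp.append(0)
--         tmat.append(temp)
--     return tmat
-- ===== SOURCE B (Python) =====
-- def convert_into_matrix(coefficients):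
--     cs = coefficients[1:]
--     n = len(cs)
--     if n == 0:
--         return []
--     lc = [-c for c in reversed(cs)]
--     out = [[0] * (n - 1) + [lc[0]]]
--     v = [1] + [0] * (n - 2)
--     for i in range(1, n):
--         out.append(v + [lc[i]])
--         v = [0] + v[:-1]
--     return out
-- ===== Notes on version B (the rewrite author's own statement) =====
-- stated objective: alternative
-- what changed: Replaces A's per-cell three-way branch over the full n x n index grid with a shift-register construction: the negated reversed coefficients form the last column and each row prefix is the previous unit vector shifted one place right, so rows are built by list concatenation with no per-cell Python-level conditional.
import Mathlib
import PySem

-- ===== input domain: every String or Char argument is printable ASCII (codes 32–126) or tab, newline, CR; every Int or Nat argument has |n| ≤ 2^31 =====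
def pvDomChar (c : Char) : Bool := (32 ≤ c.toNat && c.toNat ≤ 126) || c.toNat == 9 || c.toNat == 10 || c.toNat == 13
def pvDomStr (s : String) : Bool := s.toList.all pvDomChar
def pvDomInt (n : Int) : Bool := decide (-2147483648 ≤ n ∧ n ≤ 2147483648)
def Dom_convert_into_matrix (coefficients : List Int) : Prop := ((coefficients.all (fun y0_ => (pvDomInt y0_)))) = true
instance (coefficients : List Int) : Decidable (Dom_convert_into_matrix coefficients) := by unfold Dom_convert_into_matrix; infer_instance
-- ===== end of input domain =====

-- B builds the companion matrix by a shift-register construction (last column = negated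
-- reversed coefficients, each row prefix = previous unit vector shifted right) instead of
-- A's per-cell three-way branch; objective: alternative decomposition, same cost.

-- ===== PORT A =====
def convert_into_matrix (coefficients : List Int) : List (List Int) :=
  let cs := PySem.List.slice coefficients (some 1) none
  let n : Int := cs.length
  (PySem.List.pyRange 0 n 1).foldl (fun tmat i =>
    tmat ++ [(PySem.List.pyRange 0 n 1).foldl (fun temp j =>
      if i = j + 1 then temp ++ [(1:Int)]
      else if j = n - 1 then temp ++ [-(PySem.List.pyGetD cs (-i-1) 0)]
      else temp ++ [(0:Int)]) []]) []

-- ===== PORT B =====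
-- transliteration of Source B: reversed(cs) → List.reverse, v[:-1] → List.dropLast (exact)
def convert_into_matrix_alt (coefficients : List Int) : List (List Int) :=
  let cs := PySem.List.slice coefficients (some 1) none
  let n := cs.length
  if n = 0 then []
  else
    let lc := cs.reverse.map (fun c => -c)
    let out0 := [List.replicate (n-1) (0:Int) ++ [PySem.List.pyGetD lc 0 0]]
    let v0 := (1:Int) :: List.replicate (n-2) 0
    ((PySem.List.pyRange 1 (n:Int) 1).foldl
      (fun (st : List (List Int) × List Int) i =>
        (st.1 ++ [st.2 ++ [PySem.List.pyGetD lc i 0]], (0:Int) :: st.2.dropLast))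
      (out0, v0)).1

-- ===== PRECONDITION & SPEC =====
def Spec_convert_into_matrix (coefficients : List Int) (out : List (List Int)) : Prop := out = convert_into_matrix_alt coefficients
instance (coefficients : List Int) (out : List (List Int)) : Decidable (Spec_convert_into_matrix coefficients out) := by unfold Spec_convert_into_matrix; infer_instance

-- ===== CLAIM (what is proved, stated in full; the proofs are below) =====
def Claim_equal_convert_into_matrix : Prop := ∀ (coefficients : List Int), Dom_convert_into_matrix coefficients → Spec_convert_into_matrix coefficients (convert_into_matrix coefficients)

-- ===== LEMMAS AND PROOFS =====

-- the common row shape: unit-vector (or zero) prefix of length n-1, then the last-column entry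
def prefRow (n i : Nat) : List Int :=
  if 1 ≤ i then (List.replicate (n-1) (0:Int)).set (i-1) 1 else List.replicate (n-1) 0

def rowC (cs : List Int) (i : Nat) : List Int :=
  prefRow cs.length i ++ [-(PySem.List.pyGetD cs (-(i:Int)-1) 0)]

theorem length_prefRow (n i : Nat) : (prefRow n i).length = n - 1 := by
  unfold prefRow; split_ifs <;> simp

-- shifting a unit vector one place right
theorem shift_unit (n k : Nat) (hk : k < n) :
    (0:Int) :: ((List.replicate n (0:Int)).set k 1).dropLast
      = (List.replicate n (0:Int)).set (k+1) 1 := by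
  apply List.ext_getElem
  · simp; omega
  · intro j h1 h2
    cases j with
    | zero => simp
    | succ m =>
      have hm : m < n - 1 := by simpa using h1
      simp only [List.getElem_cons_succ, List.getElem_dropLast, List.getElem_set,
        List.getElem_replicate]
      split_ifs <;> first | rfl | omega

-- A's inner loop produces exactly rowC
theorem rowA_eq (cs : List Int) (i : Nat) (hi : i < cs.length) :
    (PySem.List.pyRange 0 (cs.length:Int) 1).foldl (fun temp j =>
      if (i:Int) = j + 1 then temp ++ [(1:Int)]
      else if j = (cs.length:Int) - 1 then temp ++ [-(PySem.List.pyGetD cs (-(i:Int)-1) 0)]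
      else temp ++ [(0:Int)]) []
    = rowC cs i := by
  set n := cs.length with hn
  set c : Int := -(PySem.List.pyGetD cs (-(i:Int)-1) 0) with hc
  have hfun : (fun (temp : List Int) (j : Int) => if (i:Int) = j + 1 then temp ++ [(1:Int)]
        else if j = (n:Int) - 1 then temp ++ [c] else temp ++ [(0:Int)])
      = fun temp j => temp ++ [if (i:Int) = j + 1 then (1:Int) else if j = (n:Int) - 1 then c else 0] := by
    funext temp j; split_ifs <;> rfl
  rw [hfun, PySem.List.foldl_append_singleton_eq_map, List.nil_append]
  apply List.ext_getElem
  · simp [rowC, length_prefRow, PySem.List.length_pyRange_one]; omega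
  · intro j h1 h2
    have hj : j < n := by simpa [PySem.List.length_pyRange_one] using h1
    rw [List.getElem_map, PySem.List.getElem_pyRange_one]
    unfold rowC
    by_cases hjn : j < n - 1
    · rw [List.getElem_append_left (by rw [length_prefRow]; omega)]
      unfold prefRow
      by_cases h1i : 1 ≤ i
      · simp only [h1i, if_pos, List.getElem_set, List.getElem_replicate, zero_add]
        split_ifs <;> first | rfl | (push_cast at *; omega)
      · simp only [h1i, if_false, List.getElem_replicate, zero_add]
        split_ifs <;> first | rfl | (push_cast at *; omega)
    · have hje : j = n - 1 := by omega
      rw [List.getElem_append_right (by rw [length_prefRow]; omega)]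
      have : (if (i:Int) = (0 + (j:Int)) + 1 then (1:Int) else if (0 + (j:Int)) = (n:Int) - 1 then c else 0) = c := by
        split_ifs <;> first | rfl | (push_cast at *; omega)
      rw [this]
      rw [List.getElem_singleton]

-- Port A equals the canonical row list
theorem A_eq (cs : List Int) :
    (PySem.List.pyRange 0 (cs.length:Int) 1).foldl (fun tmat i =>
      tmat ++ [(PySem.List.pyRange 0 (cs.length:Int) 1).foldl (fun temp j =>
        if i = j + 1 then temp ++ [(1:Int)]
        else if j = (cs.length:Int) - 1 then temp ++ [-(PySem.List.pyGetD cs (-i-1) 0)]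
        else temp ++ [(0:Int)]) []]) []
    = (List.range cs.length).map (rowC cs) := by
  rw [PySem.List.foldl_append_singleton_eq_map, List.nil_append]
  have hmap : ∀ (f : Int → List Int), (PySem.List.pyRange 0 (cs.length:Int) 1).map f
      = (List.range cs.length).map (fun (k : Nat) => f (k:Int)) := by
    intro f
    rw [PySem.List.pyRange_zero_natCast, List.map_map]
    rfl
  rw [hmap]
  apply List.map_congr_left
  intro k hk
  have hk' : k < cs.length := List.mem_range.mp hk
  simpa using rowA_eq cs k hk'

-- the last-column entry: B's lc[i] equals A's -cs[-i-1]
theorem lc_eq (cs : List Int) (i : Nat) (hi : i < cs.length) :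
    PySem.List.pyGetD (cs.reverse.map (fun c => -c)) (i:Int) 0
      = -(PySem.List.pyGetD cs (-(i:Int)-1) 0) := by
  have h1 : PySem.List.pyGetD (cs.reverse.map (fun c => -c)) (i:Int) 0
      = (cs.reverse.map (fun c => -c))[i]'(by simpa using hi) :=
    PySem.List.pyGetD_eq_getElem _ _ (by positivity) (by simpa using hi)
  have h2 : (-(i:Int) - 1) = -(((i+1 : Nat)):Int) := by push_cast; ring
  rw [h1, h2, PySem.List.pyGetD_neg_natCast cs (i+1) 0 (by omega) (by omega)]
  simp [List.getElem_reverse]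
  congr 1
  omega

-- B's loop invariant: after the iterations 1..m the output holds rows 0..m-1 and
-- the shift register holds the unit vector at position m-1
theorem B_inv (cs : List Int) (hn2 : 2 ≤ cs.length) (m : Nat) (hm1 : 1 ≤ m) (hmn : m ≤ cs.length) :
    (PySem.List.pyRange 1 (m:Int) 1).foldl
      (fun (st : List (List Int) × List Int) i =>
        (st.1 ++ [st.2 ++ [PySem.List.pyGetD (cs.reverse.map (fun c => -c)) i 0]],
         (0:Int) :: st.2.dropLast))
      ([List.replicate (cs.length-1) (0:Int) ++ [PySem.List.pyGetD (cs.reverse.map (fun c => -c)) 0 0]],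
       (1:Int) :: List.replicate (cs.length-2) 0)
    = ((List.range m).map (rowC cs),
       (List.replicate (cs.length-1) (0:Int)).set (m-1) 1) := by
  set n := cs.length with hn
  induction m with
  | zero => omega
  | succ m ih =>
    by_cases hm0 : m = 0
    · subst hm0
      rw [PySem.List.pyRange_one_eq_nil (by norm_num)]
      simp only [List.foldl_nil, Prod.mk.injEq]
      constructor
      · simp only [List.range_succ, List.range_zero, List.nil_append, List.map_cons, List.map_nil]
        unfold rowC prefRow
        rw [if_neg (by omega), ← lc_eq cs 0 (by omega)]
        norm_num
        omega
      · have : (1:Int) :: List.replicate (n-2) 0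
            = (List.replicate (n-1) (0:Int)).set 0 1 := by
          have : List.replicate (n-1) (0:Int) = 0 :: List.replicate (n-2) 0 := by
            rw [← List.replicate_succ]; congr 1; omega
          rw [this]; rfl
        simpa using this
    · have hm1' : 1 ≤ m := by omega
      have hcast : ((m+1 : Nat) : Int) = (m:Int) + 1 := by push_cast; ring
      rw [hcast, PySem.List.pyRange_one_succ_right (by exact_mod_cast hm1'), List.foldl_append,
        ih hm1' (by omega)]
      simp only [List.foldl_cons, List.foldl_nil, Prod.mk.injEq]
      constructor
      · rw [List.range_succ, List.map_append, List.map_cons, List.map_nil]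
        congr 2
        unfold rowC prefRow
        rw [if_pos hm1', lc_eq cs m (by omega)]
      · rw [shift_unit (n-1) (m-1) (by omega)]
        congr 1
        omega

-- ===== VERDICT (by name: the statement is the Claim_ definition above) =====
theorem convert_into_matrix_spec : Claim_equal_convert_into_matrix := by
  intro coefficients _
  unfold Spec_convert_into_matrix convert_into_matrix convert_into_matrix_alt
  set cs := PySem.List.slice coefficients (some 1) none with hcs
  simp only []
  rw [A_eq cs]
  by_cases h0 : cs.length = 0
  · rw [if_pos h0, h0]
    simp
  · rw [if_neg h0]
    by_cases h1 : cs.length = 1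
    · rw [PySem.List.pyRange_one_eq_nil (by rw [h1]; norm_num)]
      simp only [List.foldl_nil, h1]
      simp only [List.range_one, List.map_cons, List.map_nil]
      unfold rowC prefRow
      rw [if_neg (by omega), ← lc_eq cs 0 (by omega)]
      norm_num [h1]
    · have h2 : 2 ≤ cs.length := by omega
      rw [B_inv cs h2 cs.length (by omega) (le_refl _)]
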